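-- pv_equiv track=rewrite | github.com/Estuardo07/Lab_C | mylib.py | eliminar_entre_llaves
-- ===== SOURCE A (Python) =====
-- def eliminar_entre_llaves(texto):
--     nuevo_texto = ""
--     entre_llaves = False
--
--     for caracter in texto:
--         if caracter == '{':
--             entre_llaves = True
--         elif caracter == '}':
--             entre_llaves = False
--         elif not entre_llaves:
--             nuevo_texto += caracter
--
--     return nuevo_texto
-- ===== SOURCE B (Python) =====
-- def eliminar_entre_llaves(texto):
--     out = []
--     i, n = 0, len(texto)
--     while i < n:
--         c = texto[i]
--         if c == '{':
--             j = texto.find('}', i + 1)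
--             i = n if j < 0 else j + 1
--         else:
--             if c != '}':
--                 out.append(c)
--             i += 1
--     return ''.join(out)
-- ===== Notes on version B (the rewrite author's own statement) =====
-- stated objective: alternative
-- what changed: Replaces A's per-character boolean-flag state machine by an index-based block-skipping scan: on an opening brace it jumps directly past the next closing brace located with str.find, so no in-braces flag is carried through every character.
import Mathlib
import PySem

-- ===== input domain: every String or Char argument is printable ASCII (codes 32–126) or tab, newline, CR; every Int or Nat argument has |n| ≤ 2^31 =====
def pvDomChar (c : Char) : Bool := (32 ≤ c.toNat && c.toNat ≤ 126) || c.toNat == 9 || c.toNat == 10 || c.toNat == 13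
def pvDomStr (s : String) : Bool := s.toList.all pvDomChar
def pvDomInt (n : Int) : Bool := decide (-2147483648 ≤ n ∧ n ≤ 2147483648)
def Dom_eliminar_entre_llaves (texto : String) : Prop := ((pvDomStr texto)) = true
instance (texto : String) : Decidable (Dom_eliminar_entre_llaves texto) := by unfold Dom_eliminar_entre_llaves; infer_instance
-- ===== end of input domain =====

-- B replaces A's per-character boolean-flag state machine by an index-based
-- block-skipping scan (on an opening brace it jumps directly past the next
-- closing brace with str.find); objective: alternative structure, return value
-- proved identical.

-- ===== PORT A =====
-- one step of A's for-loop: state = (nuevo_texto as chars, entre_llaves flag)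
def pvStepA (st : List Char × Bool) (c : Char) : List Char × Bool :=
  if c = '{' then (st.1, true)
  else if c = '}' then (st.1, false)
  else if !st.2 then (st.1 ++ [c], st.2)
  else st

def eliminar_entre_llaves (texto : String) : String :=
  String.ofList ((texto.toList.foldl pvStepA ([], false)).1)

-- ===== PORT B =====
-- B's while-loop: cursor i over the fixed text s; on '{' jump past the next
-- '}' located with find(…, i+1) (cursor to n if there is none)
def pvAltLoop (out : List Char) (s : List Char) (i : Nat) : List Char :=
  if h : i < s.length then
    if s[i] = '{' then
      if PySem.Chars.findFrom s ['}'] ((i + 1 : Nat) : Int) < 0 then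
        pvAltLoop out s s.length
      else
        pvAltLoop out s (PySem.Chars.findFrom s ['}'] ((i + 1 : Nat) : Int) + 1).toNat
    else if s[i] = '}' then pvAltLoop out s (i + 1)
    else pvAltLoop (out ++ [s[i]]) s (i + 1)
  else out
termination_by s.length - i
decreasing_by
  · omega
  · rename_i hj
    rw [PySem.Chars.findFrom_natCast s ['}'] (i + 1) (by omega)] at hj ⊢
    by_cases hf : PySem.Chars.find (s.drop (i + 1)) ['}'] = -1
    · simp [hf] at hj
    · have := PySem.Chars.neg_one_le_find (s.drop (i + 1)) ['}']
      simp only [if_neg hf] at hj ⊢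
      omega
  · omega
  · omega

def eliminar_entre_llaves_alt (texto : String) : String :=
  String.ofList (pvAltLoop [] texto.toList 0)

-- ===== PRECONDITION & SPEC =====
def Spec_eliminar_entre_llaves (texto : String) (out : String) : Prop := out = eliminar_entre_llaves_alt texto
instance (texto : String) (out : String) : Decidable (Spec_eliminar_entre_llaves texto out) := by unfold Spec_eliminar_entre_llaves; infer_instance

-- ===== CLAIM (what is proved, stated in full; the proofs are below) =====
def Claim_equal_eliminar_entre_llaves : Prop := ∀ (texto : String), Dom_eliminar_entre_llaves texto → Spec_eliminar_entre_llaves texto (eliminar_entre_llaves texto)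

-- ===== LEMMAS AND PROOFS =====

-- proof-side abstraction: the list after the first '}' ([] if there is none)
def pvDropBrace : List Char → List Char
  | [] => []
  | c :: cs => if c = '}' then cs else pvDropBrace cs

theorem pvDropBrace_of_not_mem (cs : List Char) (h : '}' ∉ cs) : pvDropBrace cs = [] := by
  induction cs with
  | nil => rfl
  | cons c cs ih =>
    simp only [List.mem_cons, not_or] at h
    simp [pvDropBrace, Ne.symm h.1, ih h.2]

theorem pvSingletonPrefix (a : Char) (l : List Char) : [a] <+: l ↔ l[0]? = some a := by
  cases l with
  | nil => simp
  | cons h t => simp [List.cons_prefix_cons, eq_comm]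

theorem pvDropBrace_of_first (cs : List Char) (n : Nat)
    (hn : cs[n]? = some '}') (hmin : ∀ i, i < n → cs[i]? ≠ some '}') :
    pvDropBrace cs = cs.drop (n + 1) := by
  induction cs generalizing n with
  | nil => simp at hn
  | cons c cs ih =>
    by_cases hc : c = '}'
    · have hn0 : n = 0 := by
        by_contra h0
        exact hmin 0 (by omega) (by simp [hc])
      subst hc hn0; simp [pvDropBrace]
    · have hn0 : n ≠ 0 := by
        intro h0; subst h0; simp at hn; exact hc hn
      obtain ⟨m, rfl⟩ := Nat.exists_eq_succ_of_ne_zero hn0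
      simp only [List.getElem?_cons_succ] at hn
      have : pvDropBrace cs = cs.drop (m + 1) := by
        refine ih m hn (fun i hi => ?_)
        have := hmin (i + 1) (by omega)
        simpa using this
      simp [pvDropBrace, hc, this]

-- when A's flag is up, everything until the first '}' is ignored
theorem pvFoldTrue (cs : List Char) (out : List Char) :
    (cs.foldl pvStepA (out, true)).1 = ((pvDropBrace cs).foldl pvStepA (out, false)).1 := by
  induction cs generalizing out with
  | nil => rfl
  | cons c cs ih =>
    by_cases hb : c = '}'
    · subst hb; simp [pvDropBrace, List.foldl_cons, pvStepA]
    · by_cases ho : c = '{'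
      · subst ho
        simpa [pvDropBrace, List.foldl_cons, pvStepA] using ih out
      · simpa [pvDropBrace, List.foldl_cons, pvStepA, hb, ho] using ih out

theorem pvMain (s : List Char) (i : Nat) (out : List Char) (hi : i ≤ s.length) :
    ((s.drop i).foldl pvStepA (out, false)).1 = pvAltLoop out s i := by
  by_cases h : i < s.length
  · have hd : s.drop i = s[i] :: s.drop (i + 1) := List.drop_eq_getElem_cons h
    have hfr := PySem.Chars.findFrom_natCast s ['}'] (i + 1) (by omega)
    by_cases ho : s[i] = '{'
    · have hL : ((s.drop i).foldl pvStepA (out, false)).1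
          = ((pvDropBrace (s.drop (i + 1))).foldl pvStepA (out, false)).1 := by
        rw [hd]
        simpa [List.foldl_cons, ho, pvStepA] using pvFoldTrue (s.drop (i + 1)) out
      rw [hL]
      by_cases hf : PySem.Chars.find (s.drop (i + 1)) ['}'] = -1
      · have hne : '}' ∉ s.drop (i + 1) := by
          have := (PySem.Chars.find_eq_neg_one_iff (s.drop (i + 1)) ['}']).mp hf
          intro hmem
          exact this ((List.singleton_infix_iff '}' (s.drop (i + 1))).mpr hmem)
        rw [pvDropBrace_of_not_mem _ hne]
        conv_rhs => rw [pvAltLoop]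
        simp only [dif_pos h, if_pos ho, hfr, if_pos hf]
        rw [if_pos (by norm_num : (-1 : Int) < 0), pvAltLoop]
        simp
      · have h0 : 0 ≤ PySem.Chars.find (s.drop (i + 1)) ['}'] := by
          have := PySem.Chars.neg_one_le_find (s.drop (i + 1)) ['}']
          omega
        obtain ⟨hpre, hmin⟩ := PySem.Chars.find_spec h0
        set n0 : Nat := (PySem.Chars.find (s.drop (i + 1)) ['}']).toNat with hn0
        have hget : (s.drop (i + 1))[n0]? = some '}' := by
          have := (pvSingletonPrefix '}' ((s.drop (i + 1)).drop n0)).mp hpre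
          simpa using this
        have hlt : n0 < (s.drop (i + 1)).length := by
          have := List.getElem?_eq_some_iff.mp hget
          exact this.1
        have hminget : ∀ k, k < n0 → (s.drop (i + 1))[k]? ≠ some '}' := by
          intro k hk hcontra
          exact hmin k hk ((pvSingletonPrefix '}' ((s.drop (i + 1)).drop k)).mpr (by simpa using hcontra))
        have hdb : pvDropBrace (s.drop (i + 1)) = s.drop (i + 1 + (n0 + 1)) := by
          rw [pvDropBrace_of_first (s.drop (i + 1)) n0 hget hminget, List.drop_drop]
        rw [hdb]
        have hle : i + 1 + (n0 + 1) ≤ s.length := by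
          simp only [List.length_drop] at hlt; omega
        rw [pvMain s (i + 1 + (n0 + 1)) out hle]
        conv_rhs => rw [pvAltLoop]
        simp only [dif_pos h, if_pos ho, hfr, if_neg hf]
        have hlt0 : ¬ ((i + 1 : Nat) : Int) + PySem.Chars.find (s.drop (i + 1)) ['}'] < 0 := by omega
        simp only [if_neg hlt0]
        congr 1
        omega
    · by_cases hb : s[i] = '}'
      · have hL : ((s.drop i).foldl pvStepA (out, false)).1
            = ((s.drop (i + 1)).foldl pvStepA (out, false)).1 := by
          rw [hd]; simp [List.foldl_cons, pvStepA, hb]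
        rw [hL, pvMain s (i + 1) out (by omega)]
        conv_rhs => rw [pvAltLoop]
        simp [h, hb]
      · have hL : ((s.drop i).foldl pvStepA (out, false)).1
            = ((s.drop (i + 1)).foldl pvStepA (out ++ [s[i]], false)).1 := by
          rw [hd]
          simp only [List.foldl_cons, pvStepA, if_neg ho, if_neg hb, Bool.not_false, if_true]
        rw [hL, pvMain s (i + 1) (out ++ [s[i]]) (by omega)]
        conv_rhs => rw [pvAltLoop]
        simp [h, ho, hb]
  · have hi' : i = s.length := by omega
    subst hi'
    rw [pvAltLoop]
    simp
termination_by s.length - i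
decreasing_by
  · omega
  · omega
  · omega

-- ===== VERDICT (by name: the statement is the Claim_ definition above) =====
theorem eliminar_entre_llaves_spec : Claim_equal_eliminar_entre_llaves := by
  intro texto _
  unfold Spec_eliminar_entre_llaves eliminar_entre_llaves eliminar_entre_llaves_alt
  exact congrArg String.ofList (by simpa using pvMain texto.toList 0 [] (by omega))
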